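-- pv_equiv track=rewrite | github.com/primrose101/CS322 | finite_state_machines/identifier.py | iden_fsm
-- ===== SOURCE A (Python) =====
-- def iden_fsm(string_input, index):
--     i = index
--
--     table = [
--         (1, 1, 4, 4),
--         (1, 1, 1, 3),
--         (4, 4, 4, 4),
--         (4, 4, 4, 4),
--
--     ]
--     state = 0
--     infut = 0
--     string_length = len(string_input)
--
--     while i < string_length:
--         if string_input[i].isalpha():
--             infut = 0
--         elif string_input[i] == '_':
--             infut = 1
--         elif string_input[i].isdigit():
--             infut = 2
--         else:
--             infut = 3
--
--         state = table[state][infut]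
--
--         if state == 4:
--             break
--
--         i += 1
--
--     return i - index
-- ===== SOURCE B (Python) =====
-- def iden_fsm(string_input, index):
--     n = len(string_input)
--     if index >= n or not (string_input[index].isalpha() or string_input[index] == '_'):
--         return 0
--     j = index + 1
--     while j < n and (string_input[j].isalpha() or string_input[j] == '_' or string_input[j].isdigit()):
--         j += 1
--     if j < n:
--         j += 1  # the FSM consumes the one delimiter that ends the identifier
--     return j - index
-- ===== Notes on version B (the rewrite author's own statement) =====
-- stated objective: simpler
-- what changed: Replaces the 4-state transition-table while-loop with a direct two-phase scan: a guard on the first character, a single run scan over alpha/underscore/digit characters, then one extra consumed delimiter when the run ends before end-of-string.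
import Mathlib
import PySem

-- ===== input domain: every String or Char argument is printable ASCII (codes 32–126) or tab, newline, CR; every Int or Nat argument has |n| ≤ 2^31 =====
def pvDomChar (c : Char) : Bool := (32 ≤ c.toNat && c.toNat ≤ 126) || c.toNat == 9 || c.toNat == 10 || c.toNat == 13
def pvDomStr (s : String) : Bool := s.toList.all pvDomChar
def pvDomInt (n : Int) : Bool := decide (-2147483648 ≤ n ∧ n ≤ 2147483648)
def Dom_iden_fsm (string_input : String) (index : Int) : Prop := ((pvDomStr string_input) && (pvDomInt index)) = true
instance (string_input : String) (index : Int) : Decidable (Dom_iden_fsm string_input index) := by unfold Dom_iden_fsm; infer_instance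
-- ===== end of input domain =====

-- B replaces A's 4-state transition-table while-loop by a guard plus a single run scan
-- (objective: simpler decomposition; same O(n) cost).
-- ===== PORT A =====
-- A's transition table (row = state, column = input class)
def idenTable : List (List Int) := [[1, 1, 4, 4], [1, 1, 1, 3], [4, 4, 4, 4], [4, 4, 4, 4]]

-- one iteration body of A's loop: classify the char (infut) and look up table[state][infut];
-- 'none' from pyGet? = Python's IndexError (unreachable under Pre_)
def idenStep (state : Int) (oc : Option Char) : Int :=
  match oc with
  | none => PySem.List.pyGetD (PySem.List.pyGetD idenTable state []) 3 4
  | some c =>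
      let infut : Int :=
        if PySem.Chars.isalpha c then 0
        else if c == '_' then 1
        else if PySem.Chars.isdigit c then 2
        else 3
      PySem.List.pyGetD (PySem.List.pyGetD idenTable state []) infut 4

-- the while loop of A, returning the final i; fuel = the remaining number of
-- iterations (L - i).toNat, so the 'fuel = 0' and 'i ≥ L' exits coincide
def idenLoopA (cs : List Char) (L : Int) (state : Int) (i : Int) : Nat → Int
  | 0 => i
  | fuel + 1 =>
      if i < L then
        let state' := idenStep state (PySem.List.pyGet? cs i)
        if state' = 4 then i else idenLoopA cs L state' (i + 1) fuel
      else i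

def iden_fsm (string_input : String) (index : Int) : Int :=
  idenLoopA string_input.toList (string_input.toList.length : Int) 0 index
      (((string_input.toList.length : Int) - index).toNat) - index

-- ===== PORT B =====
-- the run scan of B: advance j while the char is alpha, '_' or a digit;
-- fuel = the remaining number of iterations (n - j).toNat
def idenRunB (cs : List Char) (L : Int) (j : Int) : Nat → Int
  | 0 => j
  | fuel + 1 =>
      if j < L then
        match PySem.List.pyGet? cs j with
        | none => j      -- Python raises IndexError here; unreachable under Pre_
        | some c =>
            if PySem.Chars.isalpha c || c == '_' || PySem.Chars.isdigit c then
              idenRunB cs L (j + 1) fuel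
            else j
      else j

def iden_fsm_alt (string_input : String) (index : Int) : Int :=
  let cs := string_input.toList
  let n : Int := (cs.length : Int)
  if index ≥ n then 0
  else
    match PySem.List.pyGet? cs index with
    | none => 0      -- Python raises IndexError here; unreachable under Pre_
    | some c =>
        if PySem.Chars.isalpha c || c == '_' then
          let j := idenRunB cs n (index + 1) ((n - (index + 1)).toNat)
          (if j < n then j + 1 else j) - index
        else 0

-- ===== PRECONDITION & SPEC =====
-- Pre_ excludes exactly the inputs on which Python A raises IndexError: index < -len(string_input)
def Pre_iden_fsm (string_input : String) (index : Int) : Prop :=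
  -(string_input.toList.length : Int) ≤ index
instance (string_input : String) (index : Int) : Decidable (Pre_iden_fsm string_input index) := by
  unfold Pre_iden_fsm; infer_instance

def pvWitness_iden_fsm : String × Int := ("ab_1 x", 0)

def Spec_iden_fsm (string_input : String) (index : Int) (out : Int) : Prop := out = iden_fsm_alt string_input index
instance (string_input : String) (index : Int) (out : Int) : Decidable (Spec_iden_fsm string_input index out) := by unfold Spec_iden_fsm; infer_instance

-- ===== CLAIM (what is proved, stated in full; the proofs are below) =====
def Claim_equal_iden_fsm : Prop := ∀ (string_input : String) (index : Int), Dom_iden_fsm string_input index → Pre_iden_fsm string_input index → Spec_iden_fsm string_input index (iden_fsm string_input index)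

-- ===== LEMMAS AND PROOFS =====

-- table row 3 sends every input class (and the IndexError branch) to state 4
theorem idenStep_three (oc : Option Char) : idenStep 3 oc = 4 := by
  cases oc with
  | none => decide
  | some c =>
      simp only [idenStep]
      by_cases ha : PySem.Chars.isalpha c = true
      · simp [ha]; try decide
      · by_cases hu : (c == '_') = true
        · simp [ha, hu]; try decide
        · by_cases hd : PySem.Chars.isdigit c = true
          · simp [ha, hu, hd]; try decide
          · simp [ha, hu, hd]; try decide

-- table row 1: stay in state 1 on alpha/'_'/digit, go to state 3 otherwise
theorem idenStep_one (c : Char) :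
    idenStep 1 (some c) =
      (if PySem.Chars.isalpha c || c == '_' || PySem.Chars.isdigit c then 1 else 3) := by
  simp only [idenStep]
  by_cases ha : PySem.Chars.isalpha c = true
  · simp [ha]; try decide
  · by_cases hu : (c == '_') = true
    · simp [ha, hu]; try decide
    · by_cases hd : PySem.Chars.isdigit c = true
      · simp [ha, hu, hd]; try decide
      · simp [ha, hu, hd]; try decide

-- table row 0: go to state 1 on alpha/'_', to state 4 otherwise
theorem idenStep_zero (c : Char) :
    idenStep 0 (some c) =
      (if PySem.Chars.isalpha c || c == '_' then 1 else 4) := by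
  simp only [idenStep]
  by_cases ha : PySem.Chars.isalpha c = true
  · simp [ha]; try decide
  · by_cases hu : (c == '_') = true
    · simp [ha, hu]; try decide
    · by_cases hd : PySem.Chars.isdigit c = true
      · simp [ha, hu, hd]; try decide
      · simp [ha, hu, hd]; try decide

-- once in state 3 the loop stops at the very next check and returns i
theorem idenLoopA_state3 (cs : List Char) (L i : Int) (fuel : Nat) :
    idenLoopA cs L 3 i fuel = i := by
  cases fuel with
  | zero => rfl
  | succ f =>
      rw [idenLoopA]
      split
      · simp [idenStep_three]
      · rfl

-- in state 1 the loop is B's run scan followed by one extra consumed char (unless at end)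
theorem idenLoopA_state1 (cs : List Char) (L : Int) (hL : L = (cs.length : Int)) :
    ∀ (fuel : Nat) (j : Int), -L ≤ j → (L - j).toNat ≤ fuel →
    idenLoopA cs L 1 j fuel =
      (if idenRunB cs L j fuel < L then idenRunB cs L j fuel + 1 else idenRunB cs L j fuel) := by
  intro fuel
  induction fuel with
  | zero =>
      intro j hj hf
      have h : ¬ (j < L) := by omega
      rw [idenLoopA, idenRunB, if_neg h]
  | succ f ih =>
      intro j hj hf
      by_cases h : j < L
      · have hsome : ∃ c, PySem.List.pyGet? cs j = some c := by
          rcases hc : PySem.List.pyGet? cs j with _ | c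
          · rw [PySem.List.pyGet?_eq_none_iff] at hc
            exact absurd (by unfold PySem.Raise.InRange; omega) hc
          · exact ⟨c, rfl⟩
        rcases hsome with ⟨c, hc⟩
        rw [idenLoopA, idenRunB, if_pos h, if_pos h, hc]
        simp only [idenStep_one]
        by_cases hcls : (PySem.Chars.isalpha c || c == '_' || PySem.Chars.isdigit c) = true
        · rw [if_pos hcls, if_pos hcls]
          norm_num
          exact ih (j + 1) (by omega) (by omega)
        · rw [if_neg hcls, if_neg hcls]
          norm_num
          rw [idenLoopA_state3]
          rw [if_pos h]
      · rw [idenLoopA, idenRunB, if_neg h, if_neg h]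
        rw [if_neg h]

-- ===== VERDICT (by name: the statement is the Claim_ definition above) =====
theorem iden_fsm_spec : Claim_equal_iden_fsm := by
  intro s index _hdom hpre
  unfold Spec_iden_fsm iden_fsm iden_fsm_alt
  set cs := s.toList with hcs
  set L : Int := (cs.length : Int) with hL
  have hpre' : -L ≤ index := hpre
  by_cases h : index < L
  · have hnge : ¬ (index ≥ L) := by omega
    have hsome : ∃ c, PySem.List.pyGet? cs index = some c := by
      rcases hc : PySem.List.pyGet? cs index with _ | c
      · rw [PySem.List.pyGet?_eq_none_iff] at hc
        exact absurd (by unfold PySem.Raise.InRange; omega) hc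
      · exact ⟨c, rfl⟩
    rcases hsome with ⟨c, hc⟩
    have hfuel : (L - index).toNat = (L - (index + 1)).toNat + 1 := by omega
    rw [hfuel, idenLoopA, if_pos h, hc]
    rw [if_neg hnge, hc]
    simp only [idenStep_zero]
    by_cases hst : (PySem.Chars.isalpha c || c == '_') = true
    · rw [if_pos hst, if_pos hst]
      norm_num
      rw [idenLoopA_state1 cs L hL ((L - (index + 1)).toNat) (index + 1) (by omega) (by omega)]
    · rw [if_neg hst, if_neg hst]
      norm_num
  · have hge : index ≥ L := by omega
    have hfuel : (L - index).toNat = 0 := by omega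
    rw [hfuel, idenLoopA, if_pos hge]
    ring
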